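-- pv_equiv track=rewrite | github.com/mangly/mangly | Python_Scripts/metaheuristhics_utilities.py | get_optimal_scenario
-- ===== SOURCE A (Python) =====
-- def multi_dim_conversion(state, split_position):
--     count = 1
--     temp = []
--     result = []
--
--     for i in state:
--         if(count <= split_position):
--             temp.append(i)
--             count+=1
--         else:
--             result.append(temp)
--             count = 2
--             temp = [i]
--
--     if(count>1):
--         result.append(temp)
--
--     return result
--
-- def get_optimal_scenario(ndarray):
--     result = []
--     result_content = {}
--     multi_ndarray = multi_dim_conversion(ndarray, 3)
--     n = multi_ndarray[len(multi_ndarray)-1][0]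
--     # n_ref = multi_ndarray[len(multi_ndarray)-1][1]
--
--     for i in range(0, len(multi_ndarray) - 1):
--         result_content['time'] = multi_ndarray[i][0]
--         result_content['n'] = n
--         result_content['M'] = multi_ndarray[i][1]
--         result_content['c'] = multi_ndarray[i][2]
--         result.append(result_content.copy())
--
--     return result
-- ===== SOURCE B (Python) =====
-- def get_optimal_scenario(ndarray):
--     L = len(ndarray)
--     n = ndarray[(L - 1) // 3 * 3]
--     groups = (L + 2) // 3
--     return [{'time': ndarray[3 * i], 'n': n,
--              'M': ndarray[3 * i + 1], 'c': ndarray[3 * i + 2]}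
--             for i in range(groups - 1)]
-- ===== Notes on version B (the rewrite author's own statement) =====
-- stated objective: simpler
-- what changed: Drops the multi_dim_conversion chunking helper entirely and reads the flat array by strided indexing (ndarray[3*i], 3*i+1, 3*i+2), computing the group count and the n-index arithmetically in one comprehension.
import Mathlib
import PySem

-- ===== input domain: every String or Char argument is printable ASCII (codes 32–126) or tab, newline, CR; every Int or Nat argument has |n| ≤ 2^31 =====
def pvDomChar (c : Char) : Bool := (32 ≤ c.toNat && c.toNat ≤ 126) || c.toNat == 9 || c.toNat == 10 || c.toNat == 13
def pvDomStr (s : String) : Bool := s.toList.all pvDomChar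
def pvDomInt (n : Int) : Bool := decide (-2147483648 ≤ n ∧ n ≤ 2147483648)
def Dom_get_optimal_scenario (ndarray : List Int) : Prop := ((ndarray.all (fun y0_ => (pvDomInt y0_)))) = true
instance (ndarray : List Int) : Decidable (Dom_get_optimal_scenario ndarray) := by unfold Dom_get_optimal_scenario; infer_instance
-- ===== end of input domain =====

-- B drops the multi_dim_conversion chunking helper and builds the rows by strided flat
-- indexing with an arithmetic group count (objective: simpler; same O(n) cost).


-- ===== PORT A =====
def mdcStep (split_position : Int) (s : Int × List Int × List (List Int)) (i : Int) :
    Int × List Int × List (List Int) :=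
  if s.1 ≤ split_position then (s.1 + 1, s.2.1 ++ [i], s.2.2)
  else (2, [i], s.2.2 ++ [s.2.1])

def multi_dim_conversion (state : List Int) (split_position : Int) : List (List Int) :=
  let r := state.foldl (mdcStep split_position) (1, [], [])
  if r.1 > 1 then r.2.2 ++ [r.2.1] else r.2.2

def get_optimal_scenario (ndarray : List Int) : List (List (String × Int)) :=
  let m := multi_dim_conversion ndarray 3
  let n := PySem.List.pyGetD (PySem.List.pyGetD m (PySem.List.len m - 1) []) 0 0
  let r := (PySem.List.pyRange 0 (PySem.List.len m - 1) 1).foldl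
    (fun (s : List (List (String × Int)) × PySem.Dict String Int) i =>
      let row := PySem.List.pyGetD m i []
      let d := (((s.2.insert "time" (PySem.List.pyGetD row 0 0)).insert "n" n).insert
                  "M" (PySem.List.pyGetD row 1 0)).insert "c" (PySem.List.pyGetD row 2 0)
      (s.1 ++ [d.items], d))
    ([], PySem.Dict.empty)
  r.1

-- ===== PORT B =====
def get_optimal_scenario_alt (ndarray : List Int) : List (List (String × Int)) :=
  let L := PySem.List.len ndarray
  let n := PySem.List.pyGetD ndarray (PySem.Int.floordiv (L - 1) 3 * 3) 0
  let groups := PySem.Int.floordiv (L + 2) 3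
  (PySem.List.pyRange 0 (groups - 1) 1).map (fun i =>
    [("time", PySem.List.pyGetD ndarray (3 * i) 0), ("n", n),
     ("M", PySem.List.pyGetD ndarray (3 * i + 1) 0),
     ("c", PySem.List.pyGetD ndarray (3 * i + 2) 0)])

-- ===== PRECONDITION & SPEC =====
-- A raises IndexError on the empty list (indexing the empty chunk list); B's own
-- indexing raises there too, so the empty input is excluded.
def Pre_get_optimal_scenario (ndarray : List Int) : Prop := ndarray ≠ []
instance (ndarray : List Int) : Decidable (Pre_get_optimal_scenario ndarray) := by
  unfold Pre_get_optimal_scenario; infer_instance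

def pvWitness_get_optimal_scenario : List Int := [7, 1, 2, 9, 3, 4, 5]

def Spec_get_optimal_scenario (ndarray : List Int) (out : List (List (String × Int))) : Prop :=
  out = get_optimal_scenario_alt ndarray
instance (ndarray : List Int) (out : List (List (String × Int))) :
    Decidable (Spec_get_optimal_scenario ndarray out) := by
  unfold Spec_get_optimal_scenario; infer_instance

-- ===== CLAIM (what is proved, stated in full; the proofs are below) =====
def Claim_equal_get_optimal_scenario : Prop :=
  ∀ (ndarray : List Int), Dom_get_optimal_scenario ndarray →
    Pre_get_optimal_scenario ndarray →
    Spec_get_optimal_scenario ndarray (get_optimal_scenario ndarray)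

-- ===== LEMMAS AND PROOFS =====

-- the reference chunking: groups of three, a shorter (nonempty) last group
def chunk3 : List Int → List (List Int)
  | [] => []
  | [a] => [[a]]
  | [a, b] => [[a, b]]
  | a :: b :: c :: r => [a, b, c] :: chunk3 r

-- the result accumulator of A's fold only ever grows on the right
theorem mdc_fold_res (s : List Int) (cnt : Int) (temp : List Int) (res : List (List Int)) :
    s.foldl (mdcStep 3) (cnt, temp, res) =
      ((s.foldl (mdcStep 3) (cnt, temp, [])).1,
       (s.foldl (mdcStep 3) (cnt, temp, [])).2.1,
       res ++ (s.foldl (mdcStep 3) (cnt, temp, [])).2.2) := by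
  induction s generalizing cnt temp res with
  | nil => simp
  | cons i t ih =>
    simp only [List.foldl_cons, mdcStep]
    by_cases h : cnt ≤ 3
    · simp only [if_pos h]; exact ih _ _ _
    · simp only [if_neg h]
      rw [ih 2 [i] (res ++ [temp]), ih 2 [i] ([] ++ [temp])]
      simp

theorem mdc_cons3 (a b c : Int) (r : List Int) :
    multi_dim_conversion (a :: b :: c :: r) 3 = [a, b, c] :: multi_dim_conversion r 3 := by
  cases r with
  | nil => rfl
  | cons i s =>
    show multi_dim_conversion (a :: b :: c :: i :: s) 3 = _
    unfold multi_dim_conversion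
    simp only [List.foldl_cons, mdcStep]
    norm_num
    rw [mdc_fold_res s 2 [i] [[a, b, c]], mdc_fold_res s 2 [i] []]
    simp only [List.nil_append]
    split <;> simp

theorem mdc_eq_chunk3 (nd : List Int) : multi_dim_conversion nd 3 = chunk3 nd := by
  induction nd using chunk3.induct with
  | case1 => rfl
  | case2 a => rfl
  | case3 a b => rfl
  | case4 a b c r ih => rw [mdc_cons3, ih, chunk3]

theorem chunk3_ne_nil (nd : List Int) (h : nd ≠ []) : chunk3 nd ≠ [] := by
  induction nd using chunk3.induct with
  | case1 => exact absurd rfl h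
  | case2 a => simp [chunk3]
  | case3 a b => simp [chunk3]
  | case4 a b c r ih => simp [chunk3]

-- A's n value and B's n value, as standalone functions
def nA (nd : List Int) : Int :=
  PySem.List.pyGetD (PySem.List.pyGetD (multi_dim_conversion nd 3)
    (PySem.List.len (multi_dim_conversion nd 3) - 1) []) 0 0

def nB (nd : List Int) : Int :=
  PySem.List.pyGetD nd (PySem.Int.floordiv (PySem.List.len nd - 1) 3 * 3) 0

theorem nA_cons3 (a b c : Int) (r : List Int) (hr : r ≠ []) :
    nA (a :: b :: c :: r) = nA r := by
  unfold nA
  rw [mdc_cons3]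
  have hm : multi_dim_conversion r 3 ≠ [] := by rw [mdc_eq_chunk3]; exact chunk3_ne_nil r hr
  obtain ⟨q, hq⟩ : ∃ q, (multi_dim_conversion r 3).length = q + 1 := by
    have := List.length_pos_of_ne_nil hm
    exact ⟨(multi_dim_conversion r 3).length - 1, by omega⟩
  have h1 : PySem.List.len ([a, b, c] :: multi_dim_conversion r 3) - 1 = ((q + 1 : Nat) : Int) := by
    simp only [PySem.List.len_eq, List.length_cons, hq]; push_cast; ring
  have h2 : PySem.List.len (multi_dim_conversion r 3) - 1 = ((q : Nat) : Int) := by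
    simp only [PySem.List.len_eq, hq]; push_cast; ring
  rw [h1, h2, PySem.List.pyGetD_natCast, PySem.List.pyGetD_natCast]
  simp [List.getD]

theorem nB_cons3 (a b c : Int) (r : List Int) (hr : r ≠ []) :
    nB (a :: b :: c :: r) = nB r := by
  unfold nB
  obtain ⟨q, hq⟩ : ∃ q, r.length = q + 1 := by
    have := List.length_pos_of_ne_nil hr
    exact ⟨r.length - 1, by omega⟩
  rw [PySem.Int.floordiv_eq_ediv_of_pos (by norm_num : (0:Int) < 3),
    PySem.Int.floordiv_eq_ediv_of_pos (by norm_num : (0:Int) < 3)]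
  simp only [PySem.List.len_eq, List.length_cons, hq]
  have e1 : ((((q + 1 + 1 + 1 + 1 : Nat)) : Int) - 1) / 3 * 3 = ((q / 3 * 3 + 3 : Nat) : Int) := by
    omega
  have e2 : (((q + 1 : Nat) : Int) - 1) / 3 * 3 = ((q / 3 * 3 : Nat) : Int) := by
    omega
  rw [e1, e2, PySem.List.pyGetD_natCast, PySem.List.pyGetD_natCast]
  rw [show q / 3 * 3 + 3 = (q / 3 * 3 + 1) + 1 + 1 by omega]
  simp

theorem n_eq (nd : List Int) (h : nd ≠ []) : nA nd = nB nd := by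
  induction nd using chunk3.induct with
  | case1 => exact absurd rfl h
  | case2 a => norm_num [nA, nB, multi_dim_conversion, mdcStep, PySem.List.len_eq]
  | case3 a b => norm_num [nA, nB, multi_dim_conversion, mdcStep, PySem.List.len_eq]
  | case4 a b c r ih =>
    cases hr : r == [] with
    | true =>
      simp at hr; subst hr
      norm_num [nA, nB, multi_dim_conversion, mdcStep, PySem.List.len_eq]
    | false =>
      simp at hr
      rw [nA_cons3 a b c r hr, nB_cons3 a b c r hr]
      exact ih hr

-- the dict invariant through A's loop: result_content is empty or holds exactly the
-- four keys time, n, M, c in insertion order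
def dictOK (d : PySem.Dict String Int) : Prop :=
  d = PySem.Dict.empty ∨ ∃ t x y z,
    d = (((PySem.Dict.empty.insert "time" t).insert "n" x).insert "M" y).insert "c" z

def ins4 (d : PySem.Dict String Int) (t x y z : Int) : PySem.Dict String Int :=
  (((d.insert "time" t).insert "n" x).insert "M" y).insert "c" z

theorem ins4_items (d : PySem.Dict String Int) (hd : dictOK d) (t x y z : Int) :
    (ins4 d t x y z).items = [("time", t), ("n", x), ("M", y), ("c", z)] ∧
      dictOK (ins4 d t x y z) := by
  rcases hd with h | ⟨t', x', y', z', h⟩ <;> subst h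
  · exact ⟨rfl, Or.inr ⟨t, x, y, z, rfl⟩⟩
  · refine ⟨?_, Or.inr ⟨t, x, y, z, ?_⟩⟩ <;> rfl

theorem foldA_items (g0 g1 g2 : Int → Int) (n : Int) (l : List Int)
    (acc : List (List (String × Int))) (d : PySem.Dict String Int) (hd : dictOK d) :
    (l.foldl
      (fun (s : List (List (String × Int)) × PySem.Dict String Int) i =>
        let d' := ins4 s.2 (g0 i) n (g1 i) (g2 i)
        (s.1 ++ [d'.items], d')) (acc, d)).1 =
      acc ++ l.map (fun i => [("time", g0 i), ("n", n), ("M", g1 i), ("c", g2 i)]) := by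
  induction l generalizing acc d with
  | nil => simp
  | cons i t ih =>
    obtain ⟨hit, hok⟩ := ins4_items d hd (g0 i) n (g1 i) (g2 i)
    simp only [List.foldl_cons]
    rw [ih _ _ hok, hit]
    simp

-- A as a map over its index range
theorem A_map (nd : List Int) :
    get_optimal_scenario nd =
      (PySem.List.pyRange 0 (PySem.List.len (multi_dim_conversion nd 3) - 1) 1).map
        (fun i =>
          [("time", PySem.List.pyGetD (PySem.List.pyGetD (multi_dim_conversion nd 3) i []) 0 0),
           ("n", nA nd),
           ("M", PySem.List.pyGetD (PySem.List.pyGetD (multi_dim_conversion nd 3) i []) 1 0),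
           ("c", PySem.List.pyGetD (PySem.List.pyGetD (multi_dim_conversion nd 3) i []) 2 0)]) := by
  unfold get_optimal_scenario
  have := foldA_items
    (fun i => PySem.List.pyGetD (PySem.List.pyGetD (multi_dim_conversion nd 3) i []) 0 0)
    (fun i => PySem.List.pyGetD (PySem.List.pyGetD (multi_dim_conversion nd 3) i []) 1 0)
    (fun i => PySem.List.pyGetD (PySem.List.pyGetD (multi_dim_conversion nd 3) i []) 2 0)
    (nA nd)
    (PySem.List.pyRange 0 (PySem.List.len (multi_dim_conversion nd 3) - 1) 1)
    [] PySem.Dict.empty (Or.inl rfl)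
  simp only [ins4, List.nil_append] at this
  exact this

-- A's step on a full leading triple followed by a nonempty tail
theorem A_cons3 (a b c : Int) (r : List Int) (hr : r ≠ []) :
    get_optimal_scenario (a :: b :: c :: r) =
      [("time", a), ("n", nA (a :: b :: c :: r)), ("M", b), ("c", c)] ::
        get_optimal_scenario r := by
  rw [A_map, A_map, mdc_cons3]
  have hm : multi_dim_conversion r 3 ≠ [] := by rw [mdc_eq_chunk3]; exact chunk3_ne_nil r hr
  obtain ⟨q, hq⟩ : ∃ q, (multi_dim_conversion r 3).length = q + 1 := by
    have := List.length_pos_of_ne_nil hm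
    exact ⟨(multi_dim_conversion r 3).length - 1, by omega⟩
  have h1 : PySem.List.len ([a, b, c] :: multi_dim_conversion r 3) - 1 = ((q + 1 : Nat) : Int) := by
    simp only [PySem.List.len_eq, List.length_cons, hq]; push_cast; ring
  have h2 : PySem.List.len (multi_dim_conversion r 3) - 1 = ((q : Nat) : Int) := by
    simp only [PySem.List.len_eq, hq]; push_cast; ring
  rw [h1, h2, PySem.List.pyRange_zero_natCast, PySem.List.pyRange_zero_natCast,
    List.range_succ_eq_map]
  simp only [List.map_cons, List.map_map]
  refine (List.cons_eq_cons).mpr ⟨?_, ?_⟩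
  · rw [nA_cons3 a b c r hr]
    norm_num [PySem.List.pyGetD_natCast]
    exact ⟨rfl, rfl⟩
  · apply List.map_congr_left
    intro k _
    simp only [Function.comp_apply]
    have hc : ((Nat.succ k : Nat) : Int) = (((k + 1 : Nat)) : Int) := by push_cast; ring
    rw [hc, nA_cons3 a b c r hr, PySem.List.pyGetD_natCast, PySem.List.pyGetD_natCast]
    simp

-- B's step on a full leading triple followed by a nonempty tail
theorem B_cons3 (a b c : Int) (r : List Int) (hr : r ≠ []) :
    get_optimal_scenario_alt (a :: b :: c :: r) =
      [("time", a), ("n", nB (a :: b :: c :: r)), ("M", b), ("c", c)] ::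
        get_optimal_scenario_alt r := by
  unfold get_optimal_scenario_alt
  dsimp only
  obtain ⟨q, hq⟩ : ∃ q, r.length = q + 1 := by
    have := List.length_pos_of_ne_nil hr
    exact ⟨r.length - 1, by omega⟩
  have hnB : PySem.List.pyGetD (a :: b :: c :: r)
      (PySem.Int.floordiv (PySem.List.len (a :: b :: c :: r) - 1) 3 * 3) 0 =
      nB (a :: b :: c :: r) := rfl
  have hnBr : PySem.List.pyGetD r (PySem.Int.floordiv (PySem.List.len r - 1) 3 * 3) 0 =
      nB r := rfl
  rw [hnB, hnBr, PySem.Int.floordiv_eq_ediv_of_pos (by norm_num : (0:Int) < 3),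
    PySem.Int.floordiv_eq_ediv_of_pos (by norm_num : (0:Int) < 3)]
  simp only [PySem.List.len_eq, List.length_cons, hq]
  have hg1 : ((((q + 1 + 1 + 1 + 1 : Nat)) : Int) + 2) / 3 - 1 = (((q + 3) / 3 : Nat) : Int) := by
    omega
  have hg2 : ((((q + 1 : Nat)) : Int) + 2) / 3 - 1 = ((((q + 3) / 3 - 1 : Nat)) : Int) := by
    omega
  rw [hg1, hg2, PySem.List.pyRange_zero_natCast, PySem.List.pyRange_zero_natCast,
    show (q + 3) / 3 = ((q + 3) / 3 - 1) + 1 by omega, List.range_succ_eq_map]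
  simp only [List.map_cons, List.map_map]
  refine (List.cons_eq_cons).mpr ⟨?_, ?_⟩
  · norm_num [PySem.List.pyGetD_natCast, nB_cons3 a b c r hr]
    constructor
    · rw [show (1:Int) = ((1:Nat):Int) from rfl, PySem.List.pyGetD_natCast]; rfl
    · rw [show (2:Int) = ((2:Nat):Int) from rfl, PySem.List.pyGetD_natCast]; rfl
  · apply List.map_congr_left
    intro k _
    simp only [Function.comp_apply]
    have hc : ((Nat.succ k : Nat) : Int) = (((k + 1 : Nat)) : Int) := by push_cast; ring
    rw [hc, nB_cons3 a b c r hr]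
    have e1 : 3 * (((k + 1 : Nat)) : Int) = (((3 * k + 3 : Nat)) : Int) := by push_cast; ring
    have e2 : 3 * (((k + 1 : Nat)) : Int) + 1 = (((3 * k + 1 + 3 : Nat)) : Int) := by push_cast; ring
    have e3 : 3 * (((k + 1 : Nat)) : Int) + 2 = (((3 * k + 2 + 3 : Nat)) : Int) := by push_cast; ring
    have sh : ∀ (j : Nat), PySem.List.pyGetD (a :: b :: c :: r) (((j + 3 : Nat)) : Int) 0 =
        PySem.List.pyGetD r ((j : Nat) : Int) 0 := by
      intro j
      rw [PySem.List.pyGetD_natCast, PySem.List.pyGetD_natCast,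
        show j + 3 = (j + 1) + 1 + 1 by omega]
      simp
    rw [e2, e3, e1, sh (3 * k), sh (3 * k + 1), sh (3 * k + 2)]
    have f1 : (((3 * k : Nat)) : Int) = 3 * ((k : Nat) : Int) := by push_cast; ring
    have f2 : (((3 * k + 1 : Nat)) : Int) = 3 * ((k : Nat) : Int) + 1 := by push_cast; ring
    have f3 : (((3 * k + 2 : Nat)) : Int) = 3 * ((k : Nat) : Int) + 2 := by push_cast; ring
    rw [f1, f2, f3]

theorem main_eq (nd : List Int) (h : nd ≠ []) :
    get_optimal_scenario nd = get_optimal_scenario_alt nd := by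
  induction nd using chunk3.induct with
  | case1 => exact absurd rfl h
  | case2 a =>
    norm_num [get_optimal_scenario, get_optimal_scenario_alt, multi_dim_conversion, mdcStep,
      PySem.List.len_eq]
  | case3 a b =>
    norm_num [get_optimal_scenario, get_optimal_scenario_alt, multi_dim_conversion, mdcStep,
      PySem.List.len_eq]
  | case4 a b c r ih =>
    cases hr : r == [] with
    | true =>
      simp at hr; subst hr
      norm_num [get_optimal_scenario, get_optimal_scenario_alt, multi_dim_conversion, mdcStep,
        PySem.List.len_eq]
    | false =>
      simp at hr
      rw [A_cons3 a b c r hr, B_cons3 a b c r hr, ih hr,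
        nA_cons3 a b c r hr, nB_cons3 a b c r hr, n_eq r hr]

-- ===== VERDICT (by name: the statement is the Claim_ definition above) =====
theorem get_optimal_scenario_spec : Claim_equal_get_optimal_scenario := by
  intro nd _ hpre
  exact main_eq nd hpre
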